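-- pv_equiv track=rewrite | github.com/prathmesh-ghatmal/PG_DSA | arrays/day19/book_allocation_brute.py | book_allocation
-- ===== SOURCE A (Python) =====
-- def count_students(books,pages):
--     student=1
--     pagestostudent=0
--     for i in range(len(books)):
--         if pagestostudent+books[i]<=pages:
--             pagestostudent+=books[i]
--         else:
--             student+=1
--             pagestostudent=books[i]
--     return student
--
-- def book_allocation(books,k):
--     n=len(books)
--     if n<k:
--         return -1
--     high=sum(books)
--
--     if k==1:
--         return high
--     low=max(books)
--
--
--     for i in range(low,high+1):
--         if count_students(books,i)==k:
--             return i
-- ===== SOURCE B (Python) =====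
-- def _students(books, pages):
--     s = 1
--     cur = 0
--     for b in books:
--         if cur + b <= pages:
--             cur += b
--         else:
--             s += 1
--             cur = b
--     return s
--
-- def book_allocation(books, k):
--     n = len(books)
--     if n < k:
--         return -1
--     high = sum(books)
--     if k == 1:
--         return high
--     low = max(books)
--     # binary search for the least p in [low, high] with _students(books, p) <= k
--     lo, hi = low, high + 1
--     while lo < hi:
--         mid = (lo + hi) // 2
--         if _students(books, mid) <= k:
--             hi = mid
--         else:
--             lo = mid + 1
--     if lo <= high and _students(books, lo) == k:
--         return lo
--     return None
-- ===== Notes on version B (the rewrite author's own statement) =====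
-- stated objective: alternative
-- what changed: Replaces A's linear scan over every candidate page limit in [max(books), sum(books)] with a binary search for the least limit that needs at most k students (the student count is monotone for nonnegative page counts), then a single ==k check.
-- outside the precondition, e.g. on book_allocation([15, 2, -6, 7, 13], 2): A returns 16, B returns 18
import Mathlib
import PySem

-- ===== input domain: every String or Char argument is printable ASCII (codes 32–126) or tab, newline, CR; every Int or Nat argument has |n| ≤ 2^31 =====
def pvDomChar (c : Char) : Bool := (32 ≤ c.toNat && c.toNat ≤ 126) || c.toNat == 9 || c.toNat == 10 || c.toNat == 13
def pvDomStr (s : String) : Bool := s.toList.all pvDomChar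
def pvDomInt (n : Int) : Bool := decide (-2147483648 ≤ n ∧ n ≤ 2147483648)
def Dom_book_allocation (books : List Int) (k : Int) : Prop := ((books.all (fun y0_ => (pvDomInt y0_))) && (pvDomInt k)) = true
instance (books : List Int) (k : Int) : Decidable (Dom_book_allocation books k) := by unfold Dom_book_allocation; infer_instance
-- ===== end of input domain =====

-- B replaces A's linear scan over all candidate page limits with a binary search on the
-- (monotone, for nonnegative page counts) student count; objective: alternative algorithm.


-- ===== PORT A =====
-- one iteration of the greedy assignment loop body shared verbatim by A's
-- count_students and B's _students (the two Pythons have the same loop body)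
def pvStep (pages : Int) (st : Int × Int) (b : Int) : Int × Int :=
  if st.2 + b ≤ pages then (st.1, st.2 + b) else (st.1 + 1, b)

-- A's count_students: for i in range(len(books)): … books[i] …
def count_students (books : List Int) (pages : Int) : Int :=
  ((PySem.List.pyRange 0 (books.length : Int) 1).foldl
    (fun st i => pvStep pages st (PySem.List.pyGetD books i 0)) (1, 0)).1

-- for i in range(low, high+1): if count_students(books,i)==k: return i  — early-return loop
def pvScan (books : List Int) (k i stop : Int) : Option Int :=
  if i < stop then
    if count_students books i = k then some i else pvScan books k (i + 1) stop
  else none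
termination_by (stop - i).toNat
decreasing_by omega

def book_allocation (books : List Int) (k : Int) : Option Int :=
  let n : Int := (books.length : Int)
  if n < k then some (-1)
  else
    let high := books.sum
    if k = 1 then some high
    else
      match PySem.List.max? books (fun x => x) with
      | none => none   -- Python: max([]) raises ValueError; excluded by Pre_
      | some low => pvScan books k low (high + 1)

-- ===== PORT B =====
-- B's _students: for b in books: … (same body as A's count_students, fold over the list)
def pvStudents (books : List Int) (pages : Int) : Int :=
  (books.foldl (pvStep pages) (1, 0)).1

-- while lo < hi: mid = (lo+hi)//2; if _students(books,mid) <= k: hi = mid else lo = mid+1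
def pvBsearch (books : List Int) (k lo hi : Int) : Int :=
  if h : lo < hi then
    let mid := PySem.Int.floordiv (lo + hi) 2
    if pvStudents books mid ≤ k then pvBsearch books k lo mid
    else pvBsearch books k (mid + 1) hi
  else lo
termination_by (hi - lo).toNat
decreasing_by
  · have hlt : PySem.Int.floordiv (lo + hi) 2 < hi := by
      rw [PySem.Int.floordiv_lt_iff_lt_mul (by norm_num)]; omega
    omega
  · have hb := PySem.Int.floordiv_two_mid_bounds (le_of_lt h)
    omega

def book_allocation_alt (books : List Int) (k : Int) : Option Int :=
  let n : Int := (books.length : Int)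
  if n < k then some (-1)
  else
    let high := books.sum
    if k = 1 then some high
    else
      match PySem.List.max? books (fun x => x) with
      | none => none   -- max([]) raises in Python (B raises there too); excluded by Pre_
      | some low =>
          let r := pvBsearch books k low (high + 1)
          if r ≤ high ∧ pvStudents books r = k then some r else none

-- ===== PRECONDITION & SPEC =====
-- Pre_ excludes (a) lists containing a negative page count whose maximum does not exceed
-- their sum — outside the problem's natural domain (negative page counts) the student count
-- is not monotone in the page capacity, so A's first-match linear scan and B's binary search
-- may defensibly return different capacities (each with student count exactly k); when the
-- maximum exceeds the sum the scanned range is empty and such lists stay admitted — and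
-- (b) the empty list with k ≤ 0, where both A and B raise ValueError on max([]).
def Pre_book_allocation (books : List Int) (k : Int) : Prop :=
  (books = [] → 1 ≤ k) ∧ ((∀ b ∈ books, 0 ≤ b) ∨ ∃ b ∈ books, books.sum < b)
instance (books : List Int) (k : Int) : Decidable (Pre_book_allocation books k) := by
  unfold Pre_book_allocation; infer_instance

def pvWitness_book_allocation : List Int × Int := ([12, 34, 67, 90], 2)

def Spec_book_allocation (books : List Int) (k : Int) (out : Option Int) : Prop := out = book_allocation_alt books k
instance (books : List Int) (k : Int) (out : Option Int) : Decidable (Spec_book_allocation books k out) := by unfold Spec_book_allocation; infer_instance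

-- ===== CLAIM (what is proved, stated in full; the proofs are below) =====
def Claim_equal_book_allocation : Prop := ∀ (books : List Int) (k : Int), Dom_book_allocation books k → Pre_book_allocation books k → Spec_book_allocation books k (book_allocation books k)

-- ===== LEMMAS AND PROOFS =====

-- A's count loop (over range(len(books)) with indexing) is B's fold over the list
theorem count_eq_students (books : List Int) (pages : Int) :
    count_students books pages = pvStudents books pages := by
  unfold count_students pvStudents
  rw [PySem.List.foldl_pyRange_zero_pyGetD' books 0 (pvStep pages) (1, 0)]

-- monotonicity invariant: running the greedy loop with a larger capacity never
-- yields more students (carrying the nonnegativity of the current-block sums)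
theorem pvStep_mono (bs : List Int) :
    ∀ (p q s c s' c' : Int), (∀ b ∈ bs, 0 ≤ b) → p ≤ q → 0 ≤ c → 0 ≤ c' →
      (s' < s ∨ (s' = s ∧ c' ≤ c)) →
      0 ≤ (bs.foldl (pvStep p) (s, c)).2 ∧ 0 ≤ (bs.foldl (pvStep q) (s', c')).2 ∧
      ((bs.foldl (pvStep q) (s', c')).1 < (bs.foldl (pvStep p) (s, c)).1 ∨
        ((bs.foldl (pvStep q) (s', c')).1 = (bs.foldl (pvStep p) (s, c)).1 ∧
          (bs.foldl (pvStep q) (s', c')).2 ≤ (bs.foldl (pvStep p) (s, c)).2)) := by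
  induction bs with
  | nil => intro p q s c s' c' _ _ hc hc' hrel; simpa using ⟨hc, hc', hrel⟩
  | cons b bs ih =>
      intro p q s c s' c' hnn hpq hc hc' hrel
      have hb : 0 ≤ b := hnn b (by simp)
      have hnn' : ∀ x ∈ bs, 0 ≤ x := fun x hx => hnn x (by simp [hx])
      simp only [List.foldl_cons, pvStep]
      split_ifs with h1 h2 h2 <;>
        exact ih p q _ _ _ _ hnn' hpq (by omega) (by omega) (by omega)

theorem students_mono (books : List Int) (p q : Int)
    (hnn : ∀ b ∈ books, 0 ≤ b) (hpq : p ≤ q) :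
    pvStudents books q ≤ pvStudents books p := by
  have h := pvStep_mono books p q 1 0 1 0 hnn hpq le_rfl le_rfl (Or.inr ⟨rfl, le_rfl⟩)
  unfold pvStudents
  omega

-- binary-search facts: the result r of pvBsearch books k lo hi satisfies
-- lo ≤ r, r ≤ hi (when lo ≤ hi), everything in [lo, r) fails the ≤ k test,
-- and r itself passes it when r < hi (proved together by fuel induction)
theorem bsearch_props (books : List Int) (k : Int) (hnn : ∀ b ∈ books, 0 ≤ b) :
    ∀ (n : Nat) (lo hi : Int), (hi - lo).toNat ≤ n →
      lo ≤ pvBsearch books k lo hi ∧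
      (lo ≤ hi → pvBsearch books k lo hi ≤ hi) ∧
      (∀ j, lo ≤ j → j < pvBsearch books k lo hi → ¬ pvStudents books j ≤ k) ∧
      (pvBsearch books k lo hi < hi → pvStudents books (pvBsearch books k lo hi) ≤ k) := by
  intro n
  induction n with
  | zero =>
      intro lo hi hm
      have hge : ¬ lo < hi := by omega
      rw [pvBsearch]; simp only [dif_neg hge]
      exact ⟨le_rfl, fun h => by omega, fun j h1 h2 => by omega, fun h => by omega⟩
  | succ n ih =>
      intro lo hi hm
      by_cases h : lo < hi
      · have hb := PySem.Int.floordiv_two_mid_bounds (le_of_lt h)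
        have hlt : PySem.Int.floordiv (lo + hi) 2 < hi := by
          rw [PySem.Int.floordiv_lt_iff_lt_mul (by norm_num)]; omega
        rw [pvBsearch]; simp only [dif_pos h]
        by_cases hP : pvStudents books (PySem.Int.floordiv (lo + hi) 2) ≤ k
        · simp only [if_pos hP]
          obtain ⟨ge1, le1, below1, at1⟩ :=
            ih lo (PySem.Int.floordiv (lo + hi) 2) (by omega)
          refine ⟨ge1, fun _ => le_trans (le1 hb.1) (le_of_lt hlt), below1, fun _ => ?_⟩
          rcases lt_or_eq_of_le (le1 hb.1) with hr | hr
          · exact at1 hr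
          · rw [hr]; exact hP
        · simp only [if_neg hP]
          obtain ⟨ge1, le1, below1, at1⟩ := ih (PySem.Int.floordiv (lo + hi) 2 + 1) hi (by omega)
          refine ⟨by omega, fun _ => le1 (by omega), ?_, at1⟩
          intro j h1 h2
          by_cases hjm : j ≤ PySem.Int.floordiv (lo + hi) 2
          · intro hPj
            exact hP (le_trans (students_mono books j _ hnn hjm) hPj)
          · exact below1 j (by omega) h2
      · rw [pvBsearch]; simp only [dif_neg h]
        exact ⟨le_rfl, fun hh => by omega, fun j h1 h2 => by omega, fun hh => by omega⟩

-- the early-return scan finds nothing / finds the first match (fuel induction)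
theorem scan_none (books : List Int) (k : Int) :
    ∀ (n : Nat) (a b : Int), (b - a).toNat ≤ n →
      (∀ i, a ≤ i → i < b → count_students books i ≠ k) →
      pvScan books k a b = none := by
  intro n
  induction n with
  | zero =>
      intro a b hm _
      rw [pvScan]; simp only [if_neg (by omega : ¬ a < b)]
  | succ n ih =>
      intro a b hm hnone
      rw [pvScan]
      by_cases hab : a < b
      · simp only [if_pos hab, if_neg (hnone a le_rfl hab)]
        exact ih (a + 1) b (by omega) (fun i h1 h2 => hnone i (by omega) h2)
      · simp only [if_neg hab]

theorem scan_some (books : List Int) (k : Int) :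
    ∀ (n : Nat) (a b m : Int), (b - a).toNat ≤ n → a ≤ m → m < b →
      (∀ i, a ≤ i → i < m → count_students books i ≠ k) →
      count_students books m = k →
      pvScan books k a b = some m := by
  intro n
  induction n with
  | zero => intro a b m hm h1 h2 _ _; omega
  | succ n ih =>
      intro a b m hm ham hmb hnone hk
      rw [pvScan]; simp only [if_pos (by omega : a < b)]
      by_cases ha : a = m
      · subst ha; simp only [if_pos hk]
      · simp only [if_neg (hnone a le_rfl (by omega))]
        exact ih (a + 1) b m (by omega) (by omega) hmb
          (fun i h1 h2 => hnone i (by omega) h2) hk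

-- ===== VERDICT (by name: the statement is the Claim_ definition above) =====
theorem book_allocation_spec : Claim_equal_book_allocation := by
  intro books k _hdom hpre
  obtain ⟨hemp, hor⟩ := hpre
  unfold Spec_book_allocation book_allocation book_allocation_alt
  by_cases hnk : (books.length : Int) < k
  · simp [hnk]
  · simp only [if_neg hnk]
    by_cases hk1 : k = 1
    · simp [hk1]
    · simp only [if_neg hk1]
      have hne : books ≠ [] := by
        intro h; subst h
        have := hemp rfl
        simp at hnk
        omega
      obtain ⟨low, hlow⟩ : ∃ low, PySem.List.max? books (fun x => x) = some low := by
        cases books with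
        | nil => exact absurd rfl hne
        | cons b bs => exact ⟨bs.foldl max b, PySem.List.max?_id_cons b bs⟩
      rw [hlow]
      show pvScan books k low (books.sum + 1) =
        (if pvBsearch books k low (books.sum + 1) ≤ books.sum ∧
            pvStudents books (pvBsearch books k low (books.sum + 1)) = k then
          some (pvBsearch books k low (books.sum + 1)) else none)
      have hmem : low ∈ books := PySem.List.max?_mem hlow
      rcases hor with hnn | ⟨b, hb, hgt⟩
      · -- all page counts nonnegative: the monotone case
        have hls : low ≤ books.sum := List.single_le_sum hnn low hmem
        set high := books.sum with hhigh
        set r := pvBsearch books k low (high + 1) with hr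
        obtain ⟨hge, hle', hbelow, hat⟩ :=
          bsearch_props books k hnn (high + 1 - low).toNat low (high + 1) le_rfl
        have hle : r ≤ high + 1 := hle' (by omega)
        by_cases hcond : r ≤ high ∧ pvStudents books r = k
        · rw [if_pos hcond]
          exact scan_some books k (high + 1 - low).toNat low (high + 1) r (by omega)
            hge (by omega)
            (fun i h1 h2 => by
              have := hbelow i h1 h2
              rw [count_eq_students]; omega)
            (by rw [count_eq_students]; exact hcond.2)
        · rw [if_neg hcond]
          apply scan_none books k (high + 1 - low).toNat low (high + 1) (by omega)
          intro i h1 h2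
          rw [count_eq_students]
          by_cases hir : i < r
          · have := hbelow i h1 hir
            omega
          · have hri : r ≤ i := by omega
            have hrhigh : r ≤ high := by omega
            have hPr : pvStudents books r ≤ k := hat (by omega)
            have hrk : pvStudents books r ≠ k := fun h => hcond ⟨hrhigh, h⟩
            have hmono := students_mono books r i hnn hri
            omega
      · -- some entry exceeds the sum: the scanned range [max, sum] is empty
        have hbl : b ≤ low := PySem.List.max?_isMax hlow b hb
        have hgtl : books.sum < low := lt_of_lt_of_le hgt hbl
        have hA : pvScan books k low (books.sum + 1) = none := by
          rw [pvScan]; simp only [if_neg (by omega : ¬ low < books.sum + 1)]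
        have hB : pvBsearch books k low (books.sum + 1) = low := by
          rw [pvBsearch]; simp only [dif_neg (by omega : ¬ low < books.sum + 1)]
        rw [hA, hB, if_neg (by omega : ¬ (low ≤ books.sum ∧ pvStudents books low = k))]
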